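-- pv_equiv track=rewrite | github.com/PrometheusDevCreator/CERBERUS | app/orchestrator.py | build_history_for_agent
-- ===== SOURCE A (Python) =====
-- from typing import Optional
--
-- RESPONSE_DISCIPLINE = (
--     "[Response Discipline]: Be concise unless Matthew explicitly asks for depth. "
--     "Receipts must be one short sentence. Direct replies should usually stay within 2-4 sentences. "
--     "Conference discussion turns should stay within 3 short points or roughly 120 words. "
--     "Final briefs should stay within 4 short lines."
-- )
--
-- def build_history_for_agent(
--     agent_id: str,
--     raw_msgs: list,
--     guidance: Optional[str] = None,
--     memory_context: Optional[str] = None,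
-- ) -> list:
--     """Build API-compatible conversation history for an agent."""
--     history = []
--     for msg in raw_msgs:
--         speaker = msg["speaker"]
--         text = msg["text"]
--
--         if speaker == agent_id:
--             role = "assistant"
--             content = text
--         else:
--             role = "user"
--             label = speaker.capitalize()
--             content = f"[{label}]: {text}"
--
--         if history and history[-1]["role"] == role:
--             history[-1]["content"] += f"\n\n{content}"
--         else:
--             history.append({"role": role, "content": content})
--
--     if memory_context:
--         if history and history[-1]["role"] == "user":
--             history[-1]["content"] += f"\n\n{memory_context}"
--         else:
--             history.append({"role": "user", "content": memory_context})
--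
--     if history and history[-1]["role"] == "user":
--         history[-1]["content"] += f"\n\n{RESPONSE_DISCIPLINE}"
--     else:
--         history.append({"role": "user", "content": RESPONSE_DISCIPLINE})
--
--     if guidance:
--         guidance_text = f"[Conference Controller]: {guidance}"
--         if history and history[-1]["role"] == "user":
--             history[-1]["content"] += f"\n\n{guidance_text}"
--         else:
--             history.append({"role": "user", "content": guidance_text})
--
--     if history and history[-1]["role"] != "user":
--         history.append({"role": "user", "content": "[Matthew]: Please continue."})
--
--     return history
-- ===== SOURCE B (Python) =====
-- from typing import Optional
--
-- RESPONSE_DISCIPLINE = (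
--     "[Response Discipline]: Be concise unless Matthew explicitly asks for depth. "
--     "Receipts must be one short sentence. Direct replies should usually stay within 2-4 sentences. "
--     "Conference discussion turns should stay within 3 short points or roughly 120 words. "
--     "Final briefs should stay within 4 short lines."
-- )
--
--
-- def _coalesce(segs):
--     """Fold adjacent (role, content) segments with equal role into dicts."""
--     history = []
--     for role, content in segs:
--         if history and history[-1]["role"] == role:
--             history[-1]["content"] += "\n\n" + content
--         else:
--             history.append({"role": role, "content": content})
--     return history
--
--
-- def build_history_for_agent(
--     agent_id: str,
--     raw_msgs: list,
--     guidance: Optional[str] = None,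
--     memory_context: Optional[str] = None,
-- ) -> list:
--     """Build API-compatible conversation history for an agent."""
--     segs = [
--         ("assistant", msg["text"])
--         if msg["speaker"] == agent_id
--         else ("user", f"[{msg['speaker'].capitalize()}]: {msg['text']}")
--         for msg in raw_msgs
--     ]
--     if memory_context:
--         segs.append(("user", memory_context))
--     segs.append(("user", RESPONSE_DISCIPLINE))
--     if guidance:
--         segs.append(("user", f"[Conference Controller]: {guidance}"))
--     # the segment list always ends with a 'user' segment, so no trailing
--     # "Please continue." filler is ever needed
--     return _coalesce(segs)
-- ===== Notes on version B (the rewrite author's own statement) =====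
-- stated objective: simpler
-- what changed: B first flattens everything (messages, optional memory context, the response discipline, optional guidance) into one list of (role, content) segments and then runs a single generic adjacent-role coalescing pass, instead of A's four separately-coded merge-or-append stages plus a dead trailing 'Please continue' branch.
import Mathlib
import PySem

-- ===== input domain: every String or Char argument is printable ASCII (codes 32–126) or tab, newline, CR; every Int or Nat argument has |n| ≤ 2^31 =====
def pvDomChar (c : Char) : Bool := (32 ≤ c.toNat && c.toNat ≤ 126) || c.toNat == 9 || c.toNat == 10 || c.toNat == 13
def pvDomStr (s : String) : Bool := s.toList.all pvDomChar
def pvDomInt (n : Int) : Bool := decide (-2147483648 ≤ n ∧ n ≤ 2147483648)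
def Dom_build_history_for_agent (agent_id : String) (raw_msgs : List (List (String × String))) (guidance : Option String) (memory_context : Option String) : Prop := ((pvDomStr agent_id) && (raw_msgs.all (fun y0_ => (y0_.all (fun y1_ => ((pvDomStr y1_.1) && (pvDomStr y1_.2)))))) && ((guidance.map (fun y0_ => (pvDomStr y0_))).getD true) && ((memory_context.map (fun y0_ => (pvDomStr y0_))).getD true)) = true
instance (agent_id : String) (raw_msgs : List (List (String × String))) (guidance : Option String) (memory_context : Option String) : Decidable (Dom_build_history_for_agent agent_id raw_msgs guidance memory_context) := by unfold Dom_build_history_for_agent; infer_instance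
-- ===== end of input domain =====

-- B restates the merged history as a flat (role, content) segment list followed by one
-- generic adjacent-role coalescing pass (objective: simpler decomposition, same cost).

-- ===== PORT A =====
-- shared low-level helpers (both Pythons use the same dict idioms)
def RESPONSE_DISCIPLINE : String :=
  "[Response Discipline]: Be concise unless Matthew explicitly asks for depth. Receipts must be one short sentence. Direct replies should usually stay within 2-4 sentences. Conference discussion turns should stay within 3 short points or roughly 120 words. Final briefs should stay within 4 short lines."

-- str.capitalize(): exact on the ASCII domain (first char uppercased, rest lowered)
def pyCapitalize (s : String) : String :=
  match s.toList with
  | [] => ""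
  | c :: rest => String.ofList (PySem.Chars.upperChar c :: PySem.Chars.lower rest)

-- 'history and history[-1]["role"] == role'
def lastRoleIs (h : List (List (String × String))) (role : String) : Bool :=
  match h.getLast? with
  | some d => ((d.lookup "role").getD "" == role)
  | none => false

-- 'history[-1]["content"] += extra' (in-place mutation of the last dict)
def appendToLastContent (h : List (List (String × String))) (extra : String) : List (List (String × String)) :=
  match h.getLast? with
  | none => []
  | some d => h.dropLast ++ [d.map (fun kv => if kv.1 == "content" then (kv.1, kv.2 ++ extra) else kv)]

def build_history_for_agent (agent_id : String) (raw_msgs : List (List (String × String))) (guidance : Option String) (memory_context : Option String) : List (List (String × String)) :=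
  let history := raw_msgs.foldl (fun history msg =>
    let speaker := (msg.lookup "speaker").getD ""
    let text := (msg.lookup "text").getD ""
    let rc : String × String :=
      if speaker == agent_id then ("assistant", text)
      else ("user", "[" ++ pyCapitalize speaker ++ "]: " ++ text)
    if lastRoleIs history rc.1 then appendToLastContent history ("\n\n" ++ rc.2)
    else history ++ [[("role", rc.1), ("content", rc.2)]]) []
  let history :=
    match memory_context with
    | some m =>
        if m ≠ "" then
          if lastRoleIs history "user" then appendToLastContent history ("\n\n" ++ m)
          else history ++ [[("role", "user"), ("content", m)]]
        else history
    | none => history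
  let history :=
    if lastRoleIs history "user" then appendToLastContent history ("\n\n" ++ RESPONSE_DISCIPLINE)
    else history ++ [[("role", "user"), ("content", RESPONSE_DISCIPLINE)]]
  let history :=
    match guidance with
    | some g =>
        if g ≠ "" then
          let guidance_text := "[Conference Controller]: " ++ g
          if lastRoleIs history "user" then appendToLastContent history ("\n\n" ++ guidance_text)
          else history ++ [[("role", "user"), ("content", guidance_text)]]
        else history
    | none => history
  match history.getLast? with
  | some d => if ((d.lookup "role").getD "" != "user") then history ++ [[("role", "user"), ("content", "[Matthew]: Please continue.")]] else history
  | none => history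

-- ===== PORT B =====
def coalesceStep (h : List (List (String × String))) (seg : String × String) : List (List (String × String)) :=
  if lastRoleIs h seg.1 then appendToLastContent h ("\n\n" ++ seg.2)
  else h ++ [[("role", seg.1), ("content", seg.2)]]

def coalesce (segs : List (String × String)) : List (List (String × String)) :=
  segs.foldl coalesceStep []

def segOf (agent_id : String) (msg : List (String × String)) : String × String :=
  let speaker := (msg.lookup "speaker").getD ""
  let text := (msg.lookup "text").getD ""
  if speaker == agent_id then ("assistant", text)
  else ("user", "[" ++ pyCapitalize speaker ++ "]: " ++ text)

def build_history_for_agent_alt (agent_id : String) (raw_msgs : List (List (String × String))) (guidance : Option String) (memory_context : Option String) : List (List (String × String)) :=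
  let segs := raw_msgs.map (segOf agent_id)
  let segs := segs ++ (match memory_context with
    | some m => if m ≠ "" then [("user", m)] else []
    | none => [])
  let segs := segs ++ [("user", RESPONSE_DISCIPLINE)]
  let segs := segs ++ (match guidance with
    | some g => if g ≠ "" then [("user", "[Conference Controller]: " ++ g)] else []
    | none => [])
  coalesce segs

-- ===== PRECONDITION & SPEC =====
-- Pre_ excludes exactly the raw messages missing a "speaker" or "text" key, on which the Python A raises KeyError.
def Pre_build_history_for_agent (agent_id : String) (raw_msgs : List (List (String × String))) (guidance : Option String) (memory_context : Option String) : Prop :=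
  ∀ msg ∈ raw_msgs, (msg.lookup "speaker").isSome ∧ (msg.lookup "text").isSome
instance (agent_id : String) (raw_msgs : List (List (String × String))) (guidance : Option String) (memory_context : Option String) : Decidable (Pre_build_history_for_agent agent_id raw_msgs guidance memory_context) := by unfold Pre_build_history_for_agent; infer_instance

def pvWitness_build_history_for_agent : String × (List (List (String × String))) × Option String × Option String :=
  ("alice", [[("speaker", "alice"), ("text", "hi")], [("speaker", "bob"), ("text", "yo")]], some "wrap up", some "mem")

def Spec_build_history_for_agent (agent_id : String) (raw_msgs : List (List (String × String))) (guidance : Option String) (memory_context : Option String) (out : List (List (String × String))) : Prop := out = build_history_for_agent_alt agent_id raw_msgs guidance memory_context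
instance (agent_id : String) (raw_msgs : List (List (String × String))) (guidance : Option String) (memory_context : Option String) (out : List (List (String × String))) : Decidable (Spec_build_history_for_agent agent_id raw_msgs guidance memory_context out) := by unfold Spec_build_history_for_agent; infer_instance

-- ===== CLAIM (what is proved, stated in full; the proofs are below) =====
def Claim_equal_build_history_for_agent : Prop := ∀ (agent_id : String) (raw_msgs : List (List (String × String))) (guidance : Option String) (memory_context : Option String), Dom_build_history_for_agent agent_id raw_msgs guidance memory_context → Pre_build_history_for_agent agent_id raw_msgs guidance memory_context → Spec_build_history_for_agent agent_id raw_msgs guidance memory_context (build_history_for_agent agent_id raw_msgs guidance memory_context)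

-- ===== LEMMAS AND PROOFS =====

-- every entry a coalescing step ever produces has shape [("role", r), ("content", c)]
def HistShape (h : List (List (String × String))) : Prop :=
  ∀ d ∈ h, ∃ r c, d = [("role", r), ("content", c)]

theorem appendToLastContent_shape {h : List (List (String × String))} {e : String}
    (hs : HistShape h) : HistShape (appendToLastContent h e) := by
  unfold appendToLastContent
  cases hg : h.getLast? with
  | none => intro d hd; simp at hd
  | some d =>
    intro d' hd'
    rcases List.mem_append.1 hd' with hmem | hmem
    · exact hs d' (List.dropLast_subset h hmem)
    · obtain ⟨r, c, rfl⟩ := hs d (List.mem_of_getLast? hg)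
      simp at hmem
      exact ⟨r, c ++ e, by simp [hmem]⟩

theorem coalesceStep_shape {h : List (List (String × String))} {s : String × String}
    (hs : HistShape h) : HistShape (coalesceStep h s) := by
  unfold coalesceStep
  split
  · exact appendToLastContent_shape hs
  · intro d hd
    rcases List.mem_append.1 hd with hmem | hmem
    · exact hs d hmem
    · simp at hmem; exact ⟨s.1, s.2, hmem⟩

theorem lastRoleIs_coalesceStep_user {h : List (List (String × String))} {c : String}
    (hs : HistShape h) : lastRoleIs (coalesceStep h ("user", c)) "user" = true := by
  unfold coalesceStep
  split
  · rename_i hl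
    unfold lastRoleIs at hl ⊢
    unfold appendToLastContent
    cases hg : h.getLast? with
    | none => simp [hg] at hl
    | some d =>
      rw [hg] at hl
      obtain ⟨r, c0, rfl⟩ := hs d (List.mem_of_getLast? hg)
      simp_all [List.lookup]
  · unfold lastRoleIs
    simp [List.lookup]

theorem coalesce_foldl_shape (segs : List (String × String))
    (h : List (List (String × String))) (hs : HistShape h) :
    HistShape (segs.foldl coalesceStep h) := by
  induction segs generalizing h with
  | nil => exact hs
  | cons s t ih => exact ih _ (coalesceStep_shape hs)

theorem final_noop {h : List (List (String × String))}
    (hl : lastRoleIs h "user" = true) :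
    (match h.getLast? with
     | some d => if ((d.lookup "role").getD "" != "user") then h ++ [[("role", "user"), ("content", "[Matthew]: Please continue.")]] else h
     | none => h) = h := by
  unfold lastRoleIs at hl
  cases hg : h.getLast? with
  | none => simp [hg] at hl
  | some d =>
    rw [hg] at hl
    have hl' : ((List.lookup "role" d).getD "" == "user") = true := hl
    simp at hl'
    simp [hl']

-- ===== VERDICT (by name: the statement is the Claim_ definition above) =====
theorem build_history_for_agent_spec : Claim_equal_build_history_for_agent := by
  intro agent_id raw_msgs guidance memory_context _hdom _hpre
  unfold Spec_build_history_for_agent build_history_for_agent build_history_for_agent_alt coalesce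
  have hbody : raw_msgs.foldl
      (fun history msg =>
        let speaker := (msg.lookup "speaker").getD ""
        let text := (msg.lookup "text").getD ""
        let rc : String × String :=
          if speaker == agent_id then ("assistant", text)
          else ("user", "[" ++ pyCapitalize speaker ++ "]: " ++ text)
        if lastRoleIs history rc.1 then appendToLastContent history ("\n\n" ++ rc.2)
        else history ++ [[("role", rc.1), ("content", rc.2)]]) []
      = (raw_msgs.map (segOf agent_id)).foldl coalesceStep [] := by
    rw [List.foldl_map]
    rfl
  rw [hbody]
  simp only []
  rw [List.foldl_append, List.foldl_append, List.foldl_append]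
  set h0 := (raw_msgs.map (segOf agent_id)).foldl coalesceStep [] with hh0
  have hs0 : HistShape h0 := coalesce_foldl_shape _ [] (by intro d hd; simp at hd)
  -- memory stage
  have hmem : (match memory_context with
      | some m =>
          if m ≠ "" then
            if lastRoleIs h0 "user" then appendToLastContent h0 ("\n\n" ++ m)
            else h0 ++ [[("role", "user"), ("content", m)]]
          else h0
      | none => h0)
      = (match memory_context with
          | some m => if m ≠ "" then [(("user" : String), m)] else []
          | none => ([] : List (String × String))).foldl coalesceStep h0 := by
    cases memory_context with
    | none => rfl
    | some m => by_cases hm : m = "" <;> simp [hm, coalesceStep]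
  rw [hmem]
  set h1 := (match memory_context with
      | some m => if m ≠ "" then [(("user" : String), m)] else []
      | none => ([] : List (String × String))).foldl coalesceStep h0 with hh1
  have hs1 : HistShape h1 := coalesce_foldl_shape _ _ hs0
  have hdisc : (if lastRoleIs h1 "user" then appendToLastContent h1 ("\n\n" ++ RESPONSE_DISCIPLINE)
      else h1 ++ [[("role", "user"), ("content", RESPONSE_DISCIPLINE)]])
      = [(("user" : String), RESPONSE_DISCIPLINE)].foldl coalesceStep h1 := by
    simp [coalesceStep]
  rw [hdisc]
  set h2 := [(("user" : String), RESPONSE_DISCIPLINE)].foldl coalesceStep h1 with hh2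
  have hs2 : HistShape h2 := coalesce_foldl_shape _ _ hs1
  have hl2 : lastRoleIs h2 "user" = true := lastRoleIs_coalesceStep_user hs1
  have hguid : (match guidance with
      | some g =>
          if g ≠ "" then
            let guidance_text := "[Conference Controller]: " ++ g
            if lastRoleIs h2 "user" then appendToLastContent h2 ("\n\n" ++ guidance_text)
            else h2 ++ [[("role", "user"), ("content", guidance_text)]]
          else h2
      | none => h2)
      = (match guidance with
          | some g => if g ≠ "" then [(("user" : String), "[Conference Controller]: " ++ g)] else []
          | none => ([] : List (String × String))).foldl coalesceStep h2 := by
    cases guidance with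
    | none => rfl
    | some g => by_cases hg : g = "" <;> simp [hg, coalesceStep]
  rw [hguid]
  set h3 := (match guidance with
      | some g => if g ≠ "" then [(("user" : String), "[Conference Controller]: " ++ g)] else []
      | none => ([] : List (String × String))).foldl coalesceStep h2 with hh3
  have hl3 : lastRoleIs h3 "user" = true := by
    rw [hh3]
    cases guidance with
    | none => exact hl2
    | some g =>
      by_cases hg : g = ""
      · simp [hg]; exact hl2
      · simp [hg]; exact lastRoleIs_coalesceStep_user hs2
  exact final_noop hl3
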